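-- pv_equiv track=rewrite | github.com/evamartinezcanales/pne-studentslab | S05/P00/Seq0.py | seq_count
-- ===== SOURCE A (Python) =====
-- def seq_count(seq):
--     count = {}
--     for e in seq:
--         if e == "\n":
--             pass
--         else:
--             if e not in count:
--                 count[e] = 1
--             else:
--                 count[e] += 1
--     return count
-- ===== SOURCE B (Python) =====
-- def seq_count(seq):
--     # Peel off one distinct symbol per round: count the first remaining element
--     # with a single scan, then delete every copy of it before continuing, so the
--     # worklist shrinks to empty instead of being swept once element by element.
--     result = {}
--     rest = [e for e in seq if e != "\n"]
--     while rest: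
--         c = rest[0]
--         result[c] = rest.count(c)
--         rest = [e for e in rest if e != c]
--     return result
-- ===== Notes on version B (the rewrite author's own statement) =====
-- stated objective: alternative
-- what changed: A sweeps the sequence once, updating a dict entry per element; B works on a shrinking worklist: each round it counts the first remaining symbol with one scan, records it, and deletes all its copies, so the dict is touched once per distinct symbol and the loop runs over rounds, not elements.
import Mathlib
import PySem

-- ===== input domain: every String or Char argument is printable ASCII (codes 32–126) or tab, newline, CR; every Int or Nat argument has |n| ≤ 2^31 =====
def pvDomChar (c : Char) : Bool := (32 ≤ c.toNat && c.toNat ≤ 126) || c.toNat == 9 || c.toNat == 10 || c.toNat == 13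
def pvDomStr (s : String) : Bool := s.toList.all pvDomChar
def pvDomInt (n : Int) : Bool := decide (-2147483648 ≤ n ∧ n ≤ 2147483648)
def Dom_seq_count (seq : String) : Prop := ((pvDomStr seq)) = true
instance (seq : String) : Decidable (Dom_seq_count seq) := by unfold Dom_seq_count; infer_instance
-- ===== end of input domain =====

-- B replaces A's single element-by-element counting sweep by a peeling loop over a shrinking
-- worklist: one counting scan per distinct symbol, then all its copies are deleted; same cost
-- class, no speed claim.

-- ===== PORT A =====
def seq_count (seq : String) : List (String × Int) :=
  (seq.toList.foldl
    (fun (count : PySem.Dict String Int) (e : Char) =>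
      if e == '\n' then count
      else
        if count.contains (String.ofList [e]) then count.modify (String.ofList [e]) 0 (· + 1)
        else count.insert (String.ofList [e]) 1)
    PySem.Dict.empty).items

-- ===== PORT B =====
-- the while loop: peel the first remaining symbol, record its count, drop its copies
def peelLoop : List Char → PySem.Dict String Int → PySem.Dict String Int
  | [], result => result
  | c :: t, result =>
      peelLoop ((c :: t).filter (fun e => !(e == c)))
        (result.insert (String.ofList [c]) ((PySem.List.count (c :: t) c : Int)))
termination_by l _ => l.length
decreasing_by
  simp only [List.filter_cons, beq_self_eq_true, Bool.not_true, List.length_cons]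
  exact Nat.lt_succ_of_le (List.length_filter_le _ _)

def seq_count_alt (seq : String) : List (String × Int) :=
  (peelLoop (seq.toList.filter (fun e => !(e == '\n'))) PySem.Dict.empty).items

-- ===== PRECONDITION & SPEC =====
def Spec_seq_count (seq : String) (out : List (String × Int)) : Prop := out = seq_count_alt seq
instance (seq : String) (out : List (String × Int)) : Decidable (Spec_seq_count seq out) := by unfold Spec_seq_count; infer_instance

-- ===== CLAIM (what is proved, stated in full; the proofs are below) =====
def Claim_equal_seq_count : Prop := ∀ (seq : String), Dom_seq_count seq → Spec_seq_count seq (seq_count seq)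

-- ===== LEMMAS AND PROOFS =====

theorem pv_key_inj : Function.Injective (fun c : Char => String.ofList [c]) := by
  intro a b h
  have h2 := congrArg String.toList h
  simpa using h2

-- A's two branches are together one counter step.
theorem pv_step_eq (d : PySem.Dict String Int) (k : String) :
    (if d.contains k then d.modify k 0 (· + 1) else d.insert k 1) = d.modify k 0 (· + 1) := by
  by_cases h : d.contains k = true
  · simp [h]
  · have hn : d.get? k = none :=
      (PySem.Dict.get?_eq_none_iff_contains d k).mpr (by simpa using h)
    simp [h, PySem.Dict.modify, PySem.Dict.getD, hn]

-- A's newline-skipping loop is the counter loop over the filtered, key-mapped list.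
theorem pv_foldA_eq (ts : List Char) (d : PySem.Dict String Int) :
    ts.foldl
      (fun (count : PySem.Dict String Int) (e : Char) =>
        if e == '\n' then count
        else
          if count.contains (String.ofList [e]) then count.modify (String.ofList [e]) 0 (· + 1)
          else count.insert (String.ofList [e]) 1)
      d
    = ((ts.filter (fun e => !(e == '\n'))).map (fun e => String.ofList [e])).foldl
        (fun d x => d.modify x 0 (· + 1)) d := by
  induction ts generalizing d with
  | nil => rfl
  | cons x xs ih =>
    by_cases hx : (x == '\n') = true
    · rw [List.foldl_cons, if_pos hx, ih,
        List.filter_cons_of_neg (by simp [hx])]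
    · rw [List.foldl_cons, if_neg hx, pv_step_eq, ih,
        List.filter_cons_of_pos (by simp [hx]), List.map_cons, List.foldl_cons]

theorem pv_discard_eq {α : Type} [BEq α] (s : List α) (x : α) :
    PySem.Set.discard s x = s.filter (fun y => !(y == x)) := rfl

-- ofList commutes with filter.
theorem pv_ofList_filter (p : Char → Bool) (xs : List Char) :
    PySem.Set.ofList (xs.filter p) = (PySem.Set.ofList xs).filter p := by
  induction xs with
  | nil => rfl
  | cons x xs ih =>
    by_cases hx : p x = true
    · rw [List.filter_cons_of_pos hx, PySem.Set.ofList_cons, PySem.Set.ofList_cons,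
        List.filter_cons_of_pos hx, ih, pv_discard_eq, pv_discard_eq,
        List.filter_filter, List.filter_filter]
      congr 1
      apply List.filter_congr
      intro a _
      rw [Bool.and_comm]
    · rw [List.filter_cons_of_neg hx, PySem.Set.ofList_cons,
        List.filter_cons_of_neg hx, ih, pv_discard_eq, List.filter_filter]
      apply List.filter_congr
      intro a ha
      by_cases hax : (a == x) = true
      · have : a = x := by simpa using hax
        subst this
        simp [hx]
      · simp [hax]

-- ofList commutes with an injective map.
theorem pv_ofList_map (f : Char → String) (hf : Function.Injective f) (xs : List Char) :
    PySem.Set.ofList (xs.map f) = (PySem.Set.ofList xs).map f := by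
  induction xs with
  | nil => rfl
  | cons x xs ih =>
    rw [List.map_cons, PySem.Set.ofList_cons, PySem.Set.ofList_cons, ih,
      pv_discard_eq, pv_discard_eq, List.map_cons, List.filter_map]
    congr 2
    apply List.filter_congr
    intro a _
    simp only [Function.comp]
    by_cases hax : (a == x) = true
    · have : a = x := by simpa using hax
      subst this
      simp
    · have hne : a ≠ x := by simpa using hax
      have : f a ≠ f x := fun h => hne (hf h)
      simp [hax, this]

-- the peeling loop's invariant: with fresh keys it appends one item per distinct symbol
theorem pv_peel_eq (n : Nat) : ∀ (L : List Char) (d : PySem.Dict String Int),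
    L.length ≤ n → d.keys.Nodup →
    (∀ c ∈ L, d.contains (String.ofList [c]) = false) →
    (peelLoop L d).items
      = d.items ++ (PySem.Set.ofList L).map
          (fun c => (String.ofList [c], (PySem.List.count L c : Int))) := by
  induction n with
  | zero =>
    intro L d hlen _ _
    have : L = [] := List.eq_nil_of_length_eq_zero (Nat.le_zero.mp hlen)
    subst this
    simp [peelLoop, PySem.Set.ofList]
  | succ n ih =>
    intro L d hlen hnd hfresh
    match L with
    | [] => simp [peelLoop, PySem.Set.ofList]
    | c :: t =>
      rw [peelLoop]
      have hfc : (c :: t).filter (fun e => !(e == c)) = t.filter (fun e => !(e == c)) := by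
        simp
      have hlen' : (t.filter (fun e => !(e == c))).length ≤ n := by
        have := List.length_filter_le (fun e => !(e == c)) t
        have hlt : t.length ≤ n := Nat.lt_succ_iff.mp (by simpa using hlen)
        omega
      have hcontc : d.contains (String.ofList [c]) = false := hfresh c (by simp)
      have hnd' : (d.insert (String.ofList [c]) ((PySem.List.count (c :: t) c : Int))).keys.Nodup :=
        PySem.Dict.nodup_keys_insert _ _ _ hnd
      have hfresh' : ∀ x ∈ (c :: t).filter (fun e => !(e == c)),
          (d.insert (String.ofList [c]) ((PySem.List.count (c :: t) c : Int))).contains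
            (String.ofList [x]) = false := by
        intro x hx
        have hxne : x ≠ c := by
          have := (List.mem_filter.mp hx).2
          simpa using this
        have hkne : String.ofList [x] ≠ String.ofList [c] := fun h => hxne (pv_key_inj h)
        rw [PySem.Dict.contains_insert]
        have hxm : x ∈ c :: t := (List.mem_filter.mp hx).1
        simp [hkne, hfresh x hxm]
      rw [hfc] at hfresh' ⊢
      rw [ih _ _ hlen' hnd' hfresh',
        PySem.Dict.items_insert_of_not_contains _ _ hcontc, List.append_assoc]
      congr 1
      -- RHS set structure
      rw [PySem.Set.ofList_cons, pv_discard_eq, ← pv_ofList_filter, List.map_cons,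
        List.singleton_append]
      congr 1
      apply List.map_congr_left
      intro x hx
      have hxne : x ≠ c := by
        have hxm : x ∈ t.filter (fun e => !(e == c)) :=
          (PySem.Set.mem_ofList _ _).mp hx
        have := (List.mem_filter.mp hxm).2
        simpa using this
      congr 1
      simp only [PySem.List.count, List.count_cons]
      rw [List.count_filter (by simpa using hxne)]
      have hcx : (c == x) = false := beq_eq_false_iff_ne.mpr (Ne.symm hxne)
      simp [hcx]

-- ===== VERDICT (by name: the statement is the Claim_ definition above) =====
theorem seq_count_spec : Claim_equal_seq_count := by
  intro seq _
  unfold Spec_seq_count seq_count seq_count_alt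
  rw [pv_foldA_eq, ← PySem.Dict.counter_eq_foldl, PySem.Dict.items_counter,
    pv_ofList_map _ pv_key_inj, List.map_map,
    pv_peel_eq (seq.toList.filter (fun e => !(e == '\n'))).length _ _ le_rfl
      PySem.Dict.nodup_keys_empty (by intro c _; simp)]
  simp only [PySem.Dict.empty, List.nil_append]
  apply List.map_congr_left
  intro c _
  simp only [Function.comp]
  congr 1
  rw [List.count_map_of_injective _ _ pv_key_inj, PySem.List.count]
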